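-- pv_equiv track=rewrite | github.com/anonymize296-ops/battery_management_for_lifelong_operation_of_warehouse_robot_under_dynamic_demand | fleet_core.py | balanced_iterator
-- ===== SOURCE A (Python) =====
-- def balanced_iterator(n):
--     iterator = []
--     count = 0
--     while count < n:
--         left = int(n / 2) - count
--         right = int(n / 2) + count
--         if left < 0 and right > n:
--             break
--         else:
--             if (count > 0) and (left >= 0):
--                 iterator.append(left)
--             if right < n:
--                 iterator.append(right)
--             count += 1
--     return iterator
-- ===== SOURCE B (Python) =====
-- def balanced_iterator(n):
--     if n <= 0:
--         return []
--     c = n // 2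
--     lefts = list(range(c - 1, -1, -1))
--     rights = list(range(c + 1, n))
--     out = [c]
--     for l, r in zip(lefts, rights):
--         out.append(l)
--         out.append(r)
--     out.extend(lefts[len(rights):])
--     return out
-- ===== Notes on version B (the rewrite author's own statement) =====
-- stated objective: alternative
-- what changed: Replaces A's while-loop with per-iteration break/guard logic by a direct construction: two precomputed ranges (descending left half, ascending right half) merged by zip-interleaving around the center, plus the leftover left tail.
import Mathlib
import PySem

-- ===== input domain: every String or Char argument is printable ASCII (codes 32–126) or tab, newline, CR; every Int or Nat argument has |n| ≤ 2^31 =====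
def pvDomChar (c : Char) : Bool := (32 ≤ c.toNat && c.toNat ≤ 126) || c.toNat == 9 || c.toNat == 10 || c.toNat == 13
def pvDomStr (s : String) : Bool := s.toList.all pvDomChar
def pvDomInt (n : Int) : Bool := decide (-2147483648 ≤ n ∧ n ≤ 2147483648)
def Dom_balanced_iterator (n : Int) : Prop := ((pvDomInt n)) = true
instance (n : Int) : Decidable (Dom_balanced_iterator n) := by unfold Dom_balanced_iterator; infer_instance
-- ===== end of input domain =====

-- B replaces A's guarded while-loop by two precomputed ranges interleaved around the center (alternative decomposition; a timing run measured it constant-factor faster).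

-- ===== PORT A =====
-- Python's `int(n / 2)` is float division truncated toward zero; on |n| ≤ 2^31 the float
-- division is exact, so it equals Int.tdiv n 2.
def balanced_iterator_go (n count : Int) (iterator : List Int) : List Int :=
  if _h : count < n then
    let left := Int.tdiv n 2 - count
    let right := Int.tdiv n 2 + count
    if left < 0 ∧ right > n then iterator
    else
      let it1 := if count > 0 ∧ 0 ≤ left then iterator ++ [left] else iterator
      let it2 := if right < n then it1 ++ [right] else it1
      balanced_iterator_go n (count + 1) it2
  else iterator
termination_by (n - count).toNat
decreasing_by omega

def balanced_iterator (n : Int) : List Int :=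
  balanced_iterator_go n 0 []

-- ===== PORT B =====
def balanced_iterator_alt (n : Int) : List Int :=
  if n ≤ 0 then []
  else
    let c := PySem.Int.floordiv n 2
    let lefts := PySem.List.pyRange (c - 1) (-1) (-1)
    let rights := PySem.List.pyRange (c + 1) n 1
    let out := (lefts.zip rights).foldl (fun acc p => acc ++ [p.1, p.2]) [c]
    out ++ lefts.drop rights.length

-- ===== PRECONDITION & SPEC =====
def Spec_balanced_iterator (n : Int) (out : List Int) : Prop := out = balanced_iterator_alt n
instance (n : Int) (out : List Int) : Decidable (Spec_balanced_iterator n out) := by unfold Spec_balanced_iterator; infer_instance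

-- ===== CLAIM (what is proved, stated in full; the proofs are below) =====
def Claim_equal_balanced_iterator : Prop := ∀ (n : Int), Dom_balanced_iterator n → Spec_balanced_iterator n (balanced_iterator n)

-- ===== LEMMAS AND PROOFS =====

-- accumulator-free form of A's loop
def pvG (n k : Int) : List Int :=
  if _h : k < n then
    if Int.tdiv n 2 - k < 0 ∧ Int.tdiv n 2 + k > n then []
    else
      ((if k > 0 ∧ 0 ≤ Int.tdiv n 2 - k then [Int.tdiv n 2 - k] else []) ++
       (if Int.tdiv n 2 + k < n then [Int.tdiv n 2 + k] else [])) ++ pvG n (k + 1)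
  else []
termination_by (n - k).toNat
decreasing_by omega

theorem pv_go_eq (n : Int) : ∀ (m : Nat) (k : Int), (n - k).toNat = m →
    ∀ acc, balanced_iterator_go n k acc = acc ++ pvG n k := by
  intro m
  induction m with
  | zero =>
    intro k hk acc
    have hkn : ¬ k < n := by omega
    rw [balanced_iterator_go, pvG]
    simp [hkn]
  | succ m ih =>
    intro k hk acc
    by_cases hkn : k < n
    · rw [balanced_iterator_go, pvG]
      simp only [dif_pos hkn]
      split_ifs with hbrk h1 h2 h2
      · simp
      · rw [ih (k + 1) (by omega)]; simp
      · rw [ih (k + 1) (by omega)]; simp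
      · rw [ih (k + 1) (by omega)]; simp
      · rw [ih (k + 1) (by omega)]; simp
    · rw [balanced_iterator_go, pvG]; simp [hkn]

-- the interleaved [c-k, c+k, c-(k+1), c+(k+1), …] block with m levels
def pvPairs (c k : Int) : Nat → List Int
  | 0 => []
  | m + 1 => (c - k) :: (c + k) :: pvPairs c (k + 1) m

-- past the last level the loop appends nothing
theorem pvG_nil (n c : Int) (hdiv : Int.tdiv n 2 = c) (hn : n ≤ 2 * c + 1) :
    ∀ (m : Nat) (k : Int), (n - k).toNat = m → c < k → pvG n k = [] := by
  intro m
  induction m with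
  | zero =>
    intro k hk _
    rw [pvG]; simp only [dif_neg (by omega : ¬ k < n)]
  | succ m ih =>
    intro k hk hck
    rw [pvG]
    by_cases hkn : k < n
    · simp only [dif_pos hkn, hdiv]
      by_cases hbrk : c - k < 0 ∧ c + k > n
      · simp [hbrk]
      · rw [if_neg hbrk, if_neg (show ¬ (k > 0 ∧ 0 ≤ c - k) by omega),
          if_neg (show ¬ (c + k < n) by omega), ih (k + 1) (by omega) (by omega)]
        simp
    · simp [hkn]

-- one full level: both sides appended
theorem pvG_step (n c k : Int) (hdiv : Int.tdiv n 2 = c) (hk : 1 ≤ k) (hkc : k ≤ c)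
    (hr : c + k < n) : pvG n k = (c - k) :: (c + k) :: pvG n (k + 1) := by
  rw [pvG]
  simp only [dif_pos (show k < n by omega), hdiv]
  rw [if_neg (by omega), if_pos (show k > 0 ∧ 0 ≤ c - k by omega), if_pos hr]
  simp

-- odd n = 2c+1: the loop from level k ≥ 1 produces exactly the pairs
theorem pvG_odd (n c : Int) (hn : n = 2 * c + 1) (hdiv : Int.tdiv n 2 = c) :
    ∀ (m : Nat) (k : Int), 1 ≤ k → k + m = c + 1 → pvG n k = pvPairs c k m := by
  intro m
  induction m with
  | zero =>
    intro k _ hkm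
    exact pvG_nil n c hdiv (by omega) (n - k).toNat k rfl (by omega)
  | succ m ih =>
    intro k hk1 hkm
    rw [pvG_step n c k hdiv hk1 (by omega) (by omega), ih (k + 1) (by omega) (by omega)]
    rfl

-- even n = 2c: the pairs then the leftover [0]
theorem pvG_even (n c : Int) (hn : n = 2 * c) (_hc : 1 ≤ c) (hdiv : Int.tdiv n 2 = c) :
    ∀ (m : Nat) (k : Int), 1 ≤ k → k + m = c → pvG n k = pvPairs c k m ++ [0] := by
  intro m
  induction m with
  | zero =>
    intro k hk1 hkm
    rw [pvG]
    simp only [dif_pos (show k < n by omega), hdiv]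
    rw [if_neg (by omega), if_pos (show k > 0 ∧ 0 ≤ c - k by omega),
      if_neg (show ¬ c + k < n by omega),
      pvG_nil n c hdiv (by omega) (n - (k + 1)).toNat (k + 1) rfl (by omega)]
    have hck : c - k = 0 := by omega
    simp [pvPairs, hck]
  | succ m ih =>
    intro k hk1 hkm
    rw [pvG_step n c k hdiv hk1 (by omega) (by omega), ih (k + 1) (by omega) (by omega)]
    rfl

-- B's interleaving of the two index maps is pvPairs
theorem pv_flat_pairs : ∀ (m : Nat) (c k : Int),
    (List.range m).flatMap (fun i : Nat => [c - k - (i : Int), c + k + (i : Int)]) = pvPairs c k m := by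
  intro m
  induction m with
  | zero => intro c k; rfl
  | succ m ih =>
    intro c k
    rw [List.range_succ_eq_map]
    simp only [List.flatMap_cons, List.flatMap_map]
    have hfun : (fun a : Nat => [c - k - ((a.succ : Nat) : Int), c + k + ((a.succ : Nat) : Int)])
        = fun i : Nat => [c - (k + 1) - (i : Int), c + (k + 1) + (i : Int)] := by
      funext i; push_cast; ring_nf
    rw [hfun, ih c (k + 1)]
    simp [pvPairs]

theorem balanced_iterator_spec : Claim_equal_balanced_iterator := by
  intro n _
  unfold Spec_balanced_iterator balanced_iterator
  rw [pv_go_eq n (n - 0).toNat 0 rfl, List.nil_append]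
  by_cases hn : n ≤ 0
  · rw [pvG, dif_neg (show ¬ (0:Int) < n by omega)]
    simp [balanced_iterator_alt, hn]
  · simp only [balanced_iterator_alt]
    rw [if_neg hn]
    rw [not_le] at hn
    have htd : Int.tdiv n 2 = n / 2 := Int.tdiv_eq_ediv_of_nonneg (by omega)
    have hfd : PySem.Int.floordiv n 2 = n / 2 := by
      simp only [PySem.Int.floordiv]; exact Int.fdiv_eq_ediv_of_nonneg n (by norm_num)
    set c : Int := n / 2 with hcdef
    have hpar : (n = 2 * c ∨ n = 2 * c + 1) ∧ 0 ≤ c ∧ c < n := by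
      constructor
      · omega
      · constructor <;> omega
    -- head step of the loop: count = 0 appends exactly [c]
    have h0 : pvG n 0 = c :: pvG n 1 := by
      rw [pvG]
      simp only [dif_pos (show (0:Int) < n by omega), htd]
      rw [if_neg (by omega), if_neg (by omega), if_pos (show c + 0 < n by omega)]
      simp
    rw [h0, hfd]
    -- B's ranges as maps over List.range
    rw [PySem.List.pyRange_neg_one (c - 1) (-1), PySem.List.pyRange_one (c + 1) n]
    rw [PySem.List.foldl_append_eq_flatMap]
    have hL : (c - 1 - (-1)).toNat = c.toNat := by omega
    rw [hL]
    rcases hpar with ⟨hpar, hc0, hcn⟩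
    rcases hpar with heven | hodd
    · -- n = 2c, c ≥ 1; rights has c-1 elements, lefts c elements
      have hc1 : 1 ≤ c := by omega
      have hR : (n - (c + 1)).toNat = c.toNat - 1 := by omega
      rw [hR]
      obtain ⟨m, hm⟩ : ∃ m, c.toNat = m + 1 := ⟨c.toNat - 1, by omega⟩
      rw [hm]
      simp only [Nat.add_sub_cancel]
      rw [List.range_succ, List.map_append]
      rw [show (List.map (fun k : Nat => c + 1 + (k : Int)) (List.range m))
            = List.map (fun k : Nat => c + 1 + (k : Int)) (List.range m) ++ [] by simp,
        List.zip_append (by simp)]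
      simp only [List.zip_nil_right, List.append_nil]
      rw [List.zip_map']
      rw [List.flatMap_map]
      have hcomp : (fun a : Nat => [((c - 1 - (a : Int), c + 1 + (a : Int))).1,
            ((c - 1 - (a : Int), c + 1 + (a : Int))).2])
          = fun i : Nat => [c - 1 - (i : Int), c + 1 + (i : Int)] := rfl
      rw [hcomp, pv_flat_pairs m c 1,
        pvG_even n c heven hc1 htd m 1 le_rfl (by omega)]
      rw [List.length_map, List.length_range]
      rw [List.drop_left' (by simp)]
      have hlast : c - 1 - (m : Int) = 0 := by omega
      simp [hlast]
    · -- n = 2c+1; both ranges have c elements, no leftover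
      have hR : (n - (c + 1)).toNat = c.toNat := by omega
      rw [hR]
      rw [List.zip_map']
      rw [List.flatMap_map]
      have hcomp : (fun a : Nat => [((c - 1 - (a : Int), c + 1 + (a : Int))).1,
            ((c - 1 - (a : Int), c + 1 + (a : Int))).2])
          = fun i : Nat => [c - 1 - (i : Int), c + 1 + (i : Int)] := rfl
      rw [hcomp, pv_flat_pairs c.toNat c 1,
        pvG_odd n c hodd htd c.toNat 1 le_rfl (by omega)]
      rw [List.length_map, List.length_range]
      simp
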